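-- pv_equiv track=rewrite | github.com/AcKing-Sam/labss | scripts/disamble_bytecode.py | get_jump_table
-- ===== SOURCE A (Python) =====
-- def get_jump_table(instructions):
--
--     jump_table = {}
--     key = 0
--     value = 0
--
--     while value < len(instructions):
--         jump_table[key] = value
--
--         if instructions[value].startswith('PUSH'):
--             push_suffix = int(instructions[value].split()[0].strip('PUSH'))
--             key += push_suffix+1
--             value += 1
--         else:
--             key += 1
--             value += 1
--
--     return jump_table
-- ===== SOURCE B (Python) =====
-- def get_jump_table(instructions):
--     # pass 1: per-instruction byte sizes
--     sizes = []
--     for ins in instructions: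
--         if ins.startswith('PUSH'):
--             sizes.append(int(ins.split()[0].strip('PUSH')) + 1)
--         else:
--             sizes.append(1)
--     # pass 2: running-sum offsets over the sizes table
--     offsets = []
--     off = 0
--     for sz in sizes:
--         offsets.append(off)
--         off += sz
--     return dict(zip(offsets, range(len(instructions))))
-- ===== Notes on version B (the rewrite author's own statement) =====
-- stated objective: alternative
-- what changed: Replaces A's single fused while-loop accumulating (key,value) counters and inserting as it parses with two separate passes: first a materialized per-instruction byte-size table, then running-sum offsets zipped with the index range and turned into a dict at once.
-- outside the precondition, e.g. on get_jump_table(['PUSH']): A raises ValueError, B raises ValueError; on get_jump_table(['PUSH x 1']): A raises ValueError, B raises ValueError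
import Mathlib
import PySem

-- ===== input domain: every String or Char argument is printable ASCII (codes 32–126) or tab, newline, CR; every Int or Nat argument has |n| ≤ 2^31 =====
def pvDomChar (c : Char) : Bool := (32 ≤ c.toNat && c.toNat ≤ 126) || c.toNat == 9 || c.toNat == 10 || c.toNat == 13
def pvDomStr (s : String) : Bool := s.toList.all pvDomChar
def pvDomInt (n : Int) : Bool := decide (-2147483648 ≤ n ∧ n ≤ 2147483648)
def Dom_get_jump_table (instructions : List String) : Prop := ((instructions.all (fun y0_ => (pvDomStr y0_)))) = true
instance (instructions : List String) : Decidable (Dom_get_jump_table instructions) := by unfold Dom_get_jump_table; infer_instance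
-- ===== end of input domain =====

-- B replaces A's fused offset/index accumulator loop by two passes: a materialized
-- per-instruction byte-size table, then running-sum offsets zipped with the index range
-- (objective: alternative decomposition, same cost).

-- ===== PORT A =====
-- A's while loop: state (jump_table, key, value); the suffix of instructions still to
-- visit stands for the condition 'value < len(instructions)'.
def pvLoopA (rest : List String) (jt : PySem.Dict Int Int) (key value : Int) :
    PySem.Dict Int Int :=
  match rest with
  | [] => jt
  | ins :: rest' =>
    let jt' := jt.insert key value
    if PySem.Str.startswith ins "PUSH" then
      match PySem.Str.split₀ ins with
      | [] => jt'          -- Python raises IndexError here; excluded by Pre_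
      | w :: _ =>
        match PySem.Int.ofStr? (PySem.Str.stripChars w "PUSH") with
        | none => jt'      -- Python raises ValueError here; excluded by Pre_
        | some push_suffix => pvLoopA rest' jt' (key + push_suffix + 1) (value + 1)
    else
      pvLoopA rest' jt' (key + 1) (value + 1)

def get_jump_table (instructions : List String) : List (Int × Int) :=
  (pvLoopA instructions PySem.Dict.empty 0 0).items

-- ===== PORT B =====
-- size of one instruction in bytes; none = the int() call in Source B raises
def pvSizeB (ins : String) : Option Int :=
  if PySem.Str.startswith ins "PUSH" then
    match PySem.Str.split₀ ins with
    | [] => none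
    | w :: _ => (PySem.Int.ofStr? (PySem.Str.stripChars w "PUSH")).map (· + 1)
  else some 1

-- pass 1 of Source B: the sizes table (none = a ValueError aborted the loop)
def pvSizesB : List String → Option (List Int)
  | [] => some []
  | ins :: rest =>
    match pvSizeB ins, pvSizesB rest with
    | some sz, some r => some (sz :: r)
    | _, _ => none

-- pass 2 of Source B: running-sum offsets over the sizes table
def pvOffsetsB : List Int → Int → List Int
  | [], _ => []
  | sz :: r, off => off :: pvOffsetsB r (off + sz)

def get_jump_table_alt (instructions : List String) : List (Int × Int) :=
  match pvSizesB instructions with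
  | none => []   -- Source B raises here; excluded by Pre_
  | some sizes =>
    (PySem.Dict.ofList
      ((pvOffsetsB sizes 0).zip (PySem.List.pyRange 0 instructions.length 1))).items

-- ===== PRECONDITION & SPEC =====
-- Pre_ excludes inputs where a PUSH-prefixed instruction has no parsable int suffix:
-- there Python A raises ValueError (or IndexError), returning no value.
def Pre_get_jump_table (instructions : List String) : Prop :=
  ∀ ins ∈ instructions, PySem.Str.startswith ins "PUSH" = true →
    (PySem.Int.ofStr?
      (PySem.Str.stripChars ((PySem.Str.split₀ ins).headD "") "PUSH")).isSome = true
instance (instructions : List String) : Decidable (Pre_get_jump_table instructions) := by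
  unfold Pre_get_jump_table; infer_instance

def pvWitness_get_jump_table : List String := ["PUSH1", "ADD", "PUSH2 0x40", "STOP"]

def Spec_get_jump_table (instructions : List String) (out : List (Int × Int)) : Prop :=
  out = get_jump_table_alt instructions
instance (instructions : List String) (out : List (Int × Int)) :
    Decidable (Spec_get_jump_table instructions out) := by
  unfold Spec_get_jump_table; infer_instance

-- ===== CLAIM (what is proved, stated in full; the proofs are below) =====
def Claim_equal_get_jump_table : Prop :=
  ∀ (instructions : List String), Dom_get_jump_table instructions →
    Pre_get_jump_table instructions →
    Spec_get_jump_table instructions (get_jump_table instructions)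

-- ===== LEMMAS AND PROOFS =====

-- A's fused loop equals folding inserts of (offset, index) pairs built from B's tables.
theorem pvLoopA_eq (rest : List String) :
    ∀ (sizes : List Int) (jt : PySem.Dict Int Int) (key v : Int),
      pvSizesB rest = some sizes →
      pvLoopA rest jt key v =
        List.foldl (fun acc p => acc.insert p.1 p.2) jt
          ((pvOffsetsB sizes key).zip
            (PySem.List.pyRange v (v + rest.length) 1)) := by
  induction rest with
  | nil =>
    intro sizes jt key v h
    simp [pvSizesB] at h
    subst h
    simp [pvLoopA, pvOffsetsB]
  | cons ins rest' ih =>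
    intro sizes jt key v h
    simp only [pvSizesB] at h
    cases hsz : pvSizeB ins with
    | none => rw [hsz] at h; cases h
    | some sz =>
      cases hrest : pvSizesB rest' with
      | none => rw [hsz, hrest] at h; cases h
      | some szs =>
        rw [hsz, hrest] at h
        cases h
        have hlt : v < v + ((ins :: rest').length : Int) := by simp only [List.length_cons]; push_cast; omega
        have hlen : v + ((ins :: rest').length : Int) = (v + 1) + (rest'.length : Int) := by
          simp only [List.length_cons]; push_cast; omega
        rw [PySem.List.pyRange_one_cons hlt, hlen]
        by_cases hstart : PySem.Str.startswith ins "PUSH" = true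
        · have hc : PySem.Chars.startswith ins.toList ['P','U','S','H'] = true := by
            simpa using hstart
          cases hsplit : PySem.Str.split₀ ins with
          | nil => simp [pvSizeB, hc, hsplit] at hsz
          | cons w ws =>
            cases hof : PySem.Int.ofStr? (PySem.Str.stripChars w "PUSH") with
            | none => simp [pvSizeB, hc, hsplit, hof] at hsz
            | some p =>
              have hszv : sz = p + 1 := by
                simp [pvSizeB, hc, hsplit, hof] at hsz; omega
              subst hszv
              simp only [pvLoopA, hstart, hsplit, hof, if_true, pvOffsetsB,
                List.zip_cons_cons, List.foldl_cons]
              rw [ih szs _ _ _ hrest, show key + p + 1 = key + (p + 1) by ring]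
        · have hszv : sz = 1 := by
            have hc : PySem.Chars.startswith ins.toList ['P','U','S','H'] = false := by
              simpa using hstart
            simp [pvSizeB, hc] at hsz; omega
          subst hszv
          simp only [pvLoopA, hstart, if_false, Bool.false_eq_true, pvOffsetsB,
            List.zip_cons_cons, List.foldl_cons]
          exact ih szs _ _ _ hrest

-- under Pre_, pass 1 of B succeeds
theorem pvSizesB_isSome (xs : List String) (h : Pre_get_jump_table xs) :
    ∃ sizes, pvSizesB xs = some sizes := by
  induction xs with
  | nil => exact ⟨[], rfl⟩
  | cons ins rest ih =>
    obtain ⟨szs, hszs⟩ := ih (fun a ha hs => h a (List.mem_cons_of_mem _ ha) hs)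
    have hins : ∃ sz, pvSizeB ins = some sz := by
      by_cases hstart : PySem.Str.startswith ins "PUSH" = true
      · have hc : PySem.Chars.startswith ins.toList ['P','U','S','H'] = true := by
          simpa using hstart
        cases hsplit : PySem.Str.split₀ ins with
        | nil =>
          have := h ins List.mem_cons_self hstart
          rw [hsplit] at this
          simp at this
          exact absurd this (by decide)
        | cons w ws =>
          have := h ins List.mem_cons_self hstart
          rw [hsplit] at this
          simp only [List.headD_cons] at this
          obtain ⟨p, hp⟩ := Option.isSome_iff_exists.mp this
          exact ⟨p + 1, by simp [pvSizeB, hc, hsplit, hp]⟩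
      · have hc : PySem.Chars.startswith ins.toList ['P','U','S','H'] = false := by
          simpa using hstart
        exact ⟨1, by simp [pvSizeB, hc]⟩
    obtain ⟨sz, hsz⟩ := hins
    exact ⟨sz :: szs, by simp [pvSizesB, hsz, hszs]⟩

-- ===== VERDICT (by name: the statement is the Claim_ definition above) =====
theorem get_jump_table_spec : Claim_equal_get_jump_table := by
  intro instructions _hdom hpre
  unfold Spec_get_jump_table
  obtain ⟨sizes, hsizes⟩ := pvSizesB_isSome instructions hpre
  unfold get_jump_table get_jump_table_alt
  rw [hsizes]
  have := pvLoopA_eq instructions sizes PySem.Dict.empty 0 0 hsizes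
  simp only [zero_add] at this
  rw [this]
  rfl
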